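-- pv_equiv track=rewrite | github.com/96Jack/OD_interview_question | OD_interview_question/80_test.py | get_friend
-- ===== SOURCE A (Python) =====
-- def get_friend(n):
--     result_lst = []
--     re = 0
--     for i in n:
--         if i==0:
--             result_lst.append(re)
--             re = 0
--         elif i==1:
--             re += 1
--         else:
--             re = 0
--     return result_lst
-- ===== SOURCE B (Python) =====
-- def get_friend(n):
--     # Two-pass: build a running-count prefix table, then select entries at zeros.
--     n = list(n)
--     prefix = [0]
--     r = 0
--     for x in n:
--         r = r + 1 if x == 1 else 0
--         prefix.append(r)
--     return [c for c, x in zip(prefix, n) if x == 0]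
-- ===== Notes on version B (the rewrite author's own statement) =====
-- stated objective: alternative
-- what changed: Replaces the single accumulator scan that appends on each zero with a two-pass decomposition: first build a run-length prefix table, then select the table value at every zero via zip+comprehension.
import Mathlib
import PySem

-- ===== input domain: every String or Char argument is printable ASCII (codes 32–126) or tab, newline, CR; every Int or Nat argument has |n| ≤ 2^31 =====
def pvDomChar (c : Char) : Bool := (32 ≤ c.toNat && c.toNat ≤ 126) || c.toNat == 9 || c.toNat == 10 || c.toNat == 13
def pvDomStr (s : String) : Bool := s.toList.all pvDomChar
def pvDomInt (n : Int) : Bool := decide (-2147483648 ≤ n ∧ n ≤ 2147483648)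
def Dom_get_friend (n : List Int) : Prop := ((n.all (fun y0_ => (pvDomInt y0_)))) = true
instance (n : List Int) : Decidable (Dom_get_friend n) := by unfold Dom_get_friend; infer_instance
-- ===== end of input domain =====

-- B replaces A's single accumulator scan with a two-pass decomposition (run-length prefix table, then selection at zeros); objective: alternative, equal output on all inputs.


-- ===== PORT A =====
-- single scan: accumulator re, append re on each zero
def get_friend (n : List Int) : List Int :=
  (n.foldl (fun (s : List Int × Int) i =>
      if i = 0 then (s.1 ++ [s.2], 0)
      else if i = 1 then (s.1, s.2 + 1)
      else (s.1, 0)) ([], 0)).1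

-- ===== PORT B =====
-- two passes: build run-length prefix table, then select entries at zeros
def get_friend_alt (n : List Int) : List Int :=
  ((n.foldl (fun (s : List Int × Int) x =>
      let r := if x = 1 then s.2 + 1 else 0
      (s.1 ++ [r], r)) ([0], 0)).1.zip n).filterMap
    (fun p => if p.2 = 0 then some p.1 else none)

-- ===== PRECONDITION & SPEC =====
def Spec_get_friend (n : List Int) (out : List Int) : Prop := out = get_friend_alt n
instance (n : List Int) (out : List Int) : Decidable (Spec_get_friend n out) := by unfold Spec_get_friend; infer_instance

-- ===== CLAIM (what is proved, stated in full; the proofs are below) =====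
def Claim_equal_get_friend : Prop := ∀ (n : List Int), Dom_get_friend n → Spec_get_friend n (get_friend n)

-- ===== LEMMAS AND PROOFS =====
-- reference recursion: the emitted list given the running count r
def emit : List Int → Int → List Int
  | [], _ => []
  | x :: xs, r => if x = 0 then r :: emit xs 0 else if x = 1 then emit xs (r + 1) else emit xs 0

-- the run-length values produced after each element, given the running count r
def scanR : List Int → Int → List Int
  | [], _ => []
  | x :: xs, r => let r' := if x = 1 then r + 1 else 0; r' :: scanR xs r'

lemma foldA_eq (n : List Int) : ∀ (acc : List Int) (r : Int),
    (n.foldl (fun (s : List Int × Int) i =>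
      if i = 0 then (s.1 ++ [s.2], 0)
      else if i = 1 then (s.1, s.2 + 1)
      else (s.1, 0)) (acc, r)).1 = acc ++ emit n r := by
  induction n with
  | nil => intro acc r; simp [emit]
  | cons x xs ih =>
    intro acc r
    by_cases h0 : x = 0
    · simp [h0, emit, ih]
    · by_cases h1 : x = 1
      · simp [h1, emit, ih]
      · simp [h0, h1, emit, ih]

lemma foldB_eq (n : List Int) : ∀ (acc : List Int) (r : Int),
    (n.foldl (fun (s : List Int × Int) x =>
      let r := if x = 1 then s.2 + 1 else 0
      (s.1 ++ [r], r)) (acc, r)).1 = acc ++ scanR n r := by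
  induction n with
  | nil => intro acc r; simp [scanR]
  | cons x xs ih =>
    intro acc r
    by_cases h1 : x = 1
    · simp [h1, scanR, ih]
    · simp [h1, scanR, ih]

lemma zip_scan_eq (n : List Int) : ∀ (r : Int),
    ((r :: scanR n r).zip n).filterMap (fun p => if p.2 = 0 then some p.1 else none)
      = emit n r := by
  induction n with
  | nil => intro r; simp [emit]
  | cons x xs ih =>
    intro r
    by_cases h0 : x = 0
    · simp [h0, emit, scanR, ih]
    · by_cases h1 : x = 1
      · simp [h1, emit, scanR, ih]
      · simp [h0, h1, emit, scanR, ih]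

-- ===== VERDICT (by name: the statement is the Claim_ definition above) =====
theorem get_friend_spec : Claim_equal_get_friend := by
  intro n _
  show get_friend n = get_friend_alt n
  unfold get_friend get_friend_alt
  rw [foldA_eq n [] 0, foldB_eq n [0] 0]
  simpa using (zip_scan_eq n 0).symm
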